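-- pv_equiv track=rewrite | github.com/brentd09/PythonFun | wordweave/wordweaver.py | closest_matching
-- ===== SOURCE A (Python) =====
-- def get_character_same(test_word,target_word):
--     char_same = 0
--     w1_len = len(test_word)
--     w2_len = len(target_word)
--     if w1_len != w2_len:
--         return -1
--     for x in range(w1_len):
--         char_same += 1 if test_word[x] == target_word[x] else 0
--     return char_same
--
-- def closest_matching(list1_words, list2_words):
--     best_same = 0
--     best_words = []
--     for word1 in list1_words:
--         for word2 in list2_words:
--             same = get_character_same(word1, word2)
--             if same > best_same:
--                 best_same = same
--                 best_words = [[word1, word2, same]]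
--             elif same == best_same:
--                 best_words.append([word1, word2, same])
--     return best_words
-- ===== SOURCE B (Python) =====
-- def closest_matching(list1_words, list2_words):
--     # Materialize-then-filter: build every equal-length pair's positional-match
--     # triple in encounter order, then keep the ones achieving the best count
--     # (floored at 0, matching the empty case).
--     triples = []
--     for word1 in list1_words:
--         for word2 in list2_words:
--             if len(word1) == len(word2):
--                 same = sum(1 for a, b in zip(word1, word2) if a == b)
--                 triples.append([word1, word2, same])
--     best = max((t[2] for t in triples), default=0)
--     return [t for t in triples if t[2] == best]
-- ===== Notes on version B (the rewrite author's own statement) =====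
-- stated objective: alternative
-- what changed: Replaces the online running-max accumulator that resets the result list on each improvement with a two-pass materialize-then-filter shape: build all equal-length triples, take max with default 0, filter.
import Mathlib
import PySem

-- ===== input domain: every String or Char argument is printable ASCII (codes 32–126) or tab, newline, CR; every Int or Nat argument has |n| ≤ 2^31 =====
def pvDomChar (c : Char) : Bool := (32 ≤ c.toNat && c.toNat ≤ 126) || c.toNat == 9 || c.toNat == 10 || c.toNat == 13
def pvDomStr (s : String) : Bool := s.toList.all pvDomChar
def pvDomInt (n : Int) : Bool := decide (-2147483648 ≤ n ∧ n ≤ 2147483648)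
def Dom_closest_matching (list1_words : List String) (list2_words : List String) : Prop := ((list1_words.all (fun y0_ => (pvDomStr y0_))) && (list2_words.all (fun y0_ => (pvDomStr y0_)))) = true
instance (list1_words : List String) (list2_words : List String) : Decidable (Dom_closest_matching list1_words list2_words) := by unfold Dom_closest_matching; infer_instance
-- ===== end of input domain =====

-- B replaces A's online running-max accumulator (which resets the result list on each
-- improvement) with a materialize-then-filter two-pass shape; same cost, alternative structure.
-- ===== PORT A =====
-- A: online accumulator — running best count, result list reset on each improvement.
def get_character_same (test_word : String) (target_word : String) : Int :=
  let w1_len : Int := PySem.Str.len test_word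
  let w2_len : Int := PySem.Str.len target_word
  if w1_len ≠ w2_len then -1
  else
    (PySem.List.pyRange 0 w1_len 1).foldl
      (fun char_same x =>
        char_same + if PySem.Str.pyGet? test_word x = PySem.Str.pyGet? target_word x then 1 else 0)
      0

def closest_matching (list1_words : List String) (list2_words : List String) : List (String × String × Int) :=
  let st :=
    list1_words.foldl (fun st word1 =>
      list2_words.foldl (fun st word2 =>
        let same := get_character_same word1 word2
        if same > st.1 then (same, [(word1, word2, same)])
        else if same = st.1 then (st.1, st.2 ++ [(word1, word2, same)])
        else st) st)
      ((0 : Int), ([] : List (String × String × Int)))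
  st.2

-- ===== PORT B =====
-- B: materialize all equal-length triples, take max with default 0, filter.
-- sum(1 for a, b in zip(word1, word2) if a == b)  (a 0/1-sum is a count)
def pvZipSame (word1 : String) (word2 : String) : Int :=
  (((word1.toList.zip word2.toList).countP (fun p => p.1 == p.2) : Nat) : Int)

def closest_matching_alt (list1_words : List String) (list2_words : List String) : List (String × String × Int) :=
  let triples :=
    list1_words.foldl (fun acc word1 =>
      list2_words.foldl (fun acc word2 =>
        if PySem.Str.len word1 = PySem.Str.len word2 then
          acc ++ [(word1, word2, pvZipSame word1 word2)]
        else acc) acc)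
      ([] : List (String × String × Int))
  let best := PySem.List.maxD (triples.map (fun t => t.2.2)) (fun x => x) 0
  triples.filter (fun t => t.2.2 == best)

-- ===== PRECONDITION & SPEC =====
def Spec_closest_matching (list1_words : List String) (list2_words : List String) (out : List (String × String × Int)) : Prop := out = closest_matching_alt list1_words list2_words
instance (list1_words : List String) (list2_words : List String) (out : List (String × String × Int)) : Decidable (Spec_closest_matching list1_words list2_words out) := by unfold Spec_closest_matching; infer_instance

-- ===== CLAIM (what is proved, stated in full; the proofs are below) =====
def Claim_equal_closest_matching : Prop := ∀ (list1_words : List String) (list2_words : List String), Dom_closest_matching list1_words list2_words → Spec_closest_matching list1_words list2_words (closest_matching list1_words list2_words)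

-- ===== LEMMAS AND PROOFS =====

-- the pair stream both nested loops traverse, and the shapes the proof factors both ports into
def pvPairs (l1 l2 : List String) : List (String × String) :=
  l1.flatMap (fun w1 => l2.map (fun w2 => (w1, w2)))

def pvLenEq (p : String × String) : Bool := PySem.Str.len p.1 == PySem.Str.len p.2

def pvTrip (p : String × String) : String × String × Int := (p.1, p.2, pvZipSame p.1 p.2)

def pvT (ps : List (String × String)) : List (String × String × Int) :=
  (ps.filter pvLenEq).map pvTrip

def pvBest (t : List (String × String × Int)) : Int :=
  (t.map (fun tr => tr.2.2)).foldl max 0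

def pvF (t : List (String × String × Int)) : List (String × String × Int) :=
  t.filter (fun tr => tr.2.2 == pvBest t)

def pvStepA (st : Int × List (String × String × Int)) (p : String × String) :
    Int × List (String × String × Int) :=
  let same := get_character_same p.1 p.2
  if same > st.1 then (same, [(p.1, p.2, same)])
  else if same = st.1 then (st.1, st.2 ++ [(p.1, p.2, same)])
  else st

lemma pv_foldl_pairs {σ : Type} (f : σ → String × String → σ) (l1 l2 : List String) (init : σ) :
    l1.foldl (fun st w1 => l2.foldl (fun st w2 => f st (w1, w2)) st) init
      = (pvPairs l1 l2).foldl f init := by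
  induction l1 generalizing init with
  | nil => rfl
  | cons w1 rest ih => simp [pvPairs, List.foldl_append, List.foldl_map, ih]

lemma pv_countP_range (a b : List Char) (h : a.length = b.length) :
    (List.range a.length).countP (fun k => a[k]? == b[k]?)
      = (a.zip b).countP (fun p => p.1 == p.2) := by
  induction a generalizing b with
  | nil => simp
  | cons x a' ih =>
      cases b with
      | nil => simp at h
      | cons y b' =>
          simp only [List.length_cons, List.range_succ_eq_map, List.countP_cons,
            List.countP_map, List.zip_cons_cons]
          have := ih b' (by simpa using h)
          simp [Function.comp_def, this]

lemma pv_gcs_eq (w1 w2 : String) :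
    get_character_same w1 w2 =
      if PySem.Str.len w1 = PySem.Str.len w2 then pvZipSame w1 w2 else -1 := by
  have hlen : (PySem.Str.len w1 = PySem.Str.len w2) ↔ (w1.toList.length = w2.toList.length) := by
    simp [PySem.Str.len_eq]
  by_cases h : w1.toList.length = w2.toList.length
  · rw [get_character_same, if_neg (not_not_intro (hlen.mpr h)), if_pos (hlen.mpr h)]
    rw [PySem.Str.len_eq, PySem.List.pyRange_one]
    simp only [sub_zero, Int.toNat_natCast, List.foldl_map, zero_add,
      PySem.Str.pyGet?_natCast]
    rw [PySem.List.foldl_congr_mem (List.range w1.toList.length) _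
      (fun acc k => if (w1.toList[k]? == w2.toList[k]?) = true then acc + 1 else acc) 0
      (by intro acc k _; by_cases hk : w1.toList[k]? = w2.toList[k]? <;> simp [hk])]
    rw [PySem.List.foldl_count_if]
    rw [pv_countP_range w1.toList w2.toList h]
    simp [pvZipSame]
  · rw [get_character_same, if_pos (fun hc => h (hlen.mp hc)), if_neg (fun hc => h (hlen.mp hc))]

lemma pv_max?_cons_cons (c x : Int) (xs : List Int) :
    PySem.List.max? (c :: x :: xs) (fun y => y) = PySem.List.max? (max c x :: xs) (fun y => y) := by
  by_cases h : c < x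
  · simp [PySem.List.max?, h, max_eq_right h.le]
  · simp [PySem.List.max?, h, max_eq_left (not_lt.mp h)]

lemma pv_max?_cons (xs : List Int) : ∀ c : Int,
    PySem.List.max? (c :: xs) (fun y => y) = some (xs.foldl max c) := by
  induction xs with
  | nil => intro c; rfl
  | cons x xs ih => intro c; rw [pv_max?_cons_cons, ih, List.foldl_cons]

lemma pv_maxD_eq (xs : List Int) (h : ∀ x ∈ xs, 0 ≤ x) :
    PySem.List.maxD xs (fun x => x) 0 = xs.foldl max 0 := by
  cases xs with
  | nil => rfl
  | cons c rest =>
      have hc : max 0 c = c := max_eq_right (h c (by simp))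
      simp only [PySem.List.maxD, pv_max?_cons, Option.getD_some, List.foldl_cons, hc]

lemma pv_best_append (t : List (String × String × Int)) (tr : String × String × Int) :
    pvBest (t ++ [tr]) = max (pvBest t) tr.2.2 := by
  simp [pvBest, List.foldl_append]

lemma pv_best_nonneg (t : List (String × String × Int)) : 0 ≤ pvBest t :=
  (PySem.List.le_foldl_max _ 0).1

lemma pv_le_best (t : List (String × String × Int)) (tr : String × String × Int)
    (h : tr ∈ t) : tr.2.2 ≤ pvBest t :=
  (PySem.List.le_foldl_max _ 0).2 _ (List.mem_map_of_mem h)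

lemma pv_zip_nonneg (p : String × String) : 0 ≤ pvZipSame p.1 p.2 := by
  simp [pvZipSame]

lemma pv_invariant (ps : List (String × String)) (t : List (String × String × Int)) :
    ps.foldl pvStepA (pvBest t, pvF t) = (pvBest (t ++ pvT ps), pvF (t ++ pvT ps)) := by
  induction ps generalizing t with
  | nil => simp [pvT]
  | cons p ps ih =>
      by_cases hl : PySem.Str.len p.1 = PySem.Str.len p.2
      · -- equal lengths: the pair contributes the triple pvTrip p
        have hT : pvT (p :: ps) = pvTrip p :: pvT ps := by
          have hb : pvLenEq p = true := by rw [pvLenEq, hl]; exact beq_self_eq_true _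
          simp [pvT, hb]
        set c := pvZipSame p.1 p.2 with hc
        have hsame : get_character_same p.1 p.2 = c := by rw [pv_gcs_eq, if_pos hl]
        have hb' : pvBest (t ++ [pvTrip p]) = max (pvBest t) c := pv_best_append t _
        have hstep : pvStepA (pvBest t, pvF t) p
            = (pvBest (t ++ [pvTrip p]), pvF (t ++ [pvTrip p])) := by
          rcases lt_trichotomy (pvBest t) c with hlt | heq | hgt
          · -- improvement: A resets the list
            have hfilt : t.filter (fun tr => tr.2.2 == c) = [] := by
              rw [List.filter_eq_nil_iff]
              intro tr htr
              have := pv_le_best t tr htr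
              simp only [beq_iff_eq]
              omega
            simp only [pvStepA, hsame, hb', max_eq_right (le_of_lt hlt), pvF,
              List.filter_append, hfilt, if_pos hlt, gt_iff_lt]
            simp [pvTrip, ← hc]
          · simp only [pvStepA, hsame, hb', heq, max_self, pvF, List.filter_append,
              gt_iff_lt, lt_irrefl, ite_false]
            simp [pvTrip, ← hc]
          · have h1 : ¬ c > pvBest t := by omega
            have h2 : ¬ c = pvBest t := by omega
            simp only [pvStepA, hsame, hb', max_eq_left (le_of_lt hgt), pvF,
              List.filter_append, gt_iff_lt, if_neg h1, if_neg h2]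
            simp [pvTrip, ← hc, h2]
        calc (p :: ps).foldl pvStepA (pvBest t, pvF t)
            = ps.foldl pvStepA (pvBest (t ++ [pvTrip p]), pvF (t ++ [pvTrip p])) := by
              rw [List.foldl_cons, hstep]
          _ = (pvBest (t ++ pvT (p :: ps)), pvF (t ++ pvT (p :: ps))) := by
              rw [ih, hT, List.append_assoc]; rfl
      · -- unequal lengths: same = -1, state unchanged, no triple
        have hT : pvT (p :: ps) = pvT ps := by
          have hb : pvLenEq p = false := by rw [pvLenEq, beq_eq_false_iff_ne]; exact hl
          simp [pvT, hb]
        have hsame : get_character_same p.1 p.2 = -1 := by rw [pv_gcs_eq, if_neg hl]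
        have hb := pv_best_nonneg t
        have hstep : pvStepA (pvBest t, pvF t) p = (pvBest t, pvF t) := by
          simp only [pvStepA, hsame]
          rw [if_neg (by omega), if_neg (by omega)]
        rw [List.foldl_cons, hstep, ih, hT]

lemma pv_A_eq (l1 l2 : List String) :
    closest_matching l1 l2 = pvF (pvT (pvPairs l1 l2)) := by
  have h := pv_foldl_pairs pvStepA l1 l2 ((0 : Int), ([] : List (String × String × Int)))
  have h2 := pv_invariant (pvPairs l1 l2) []
  show (l1.foldl (fun st w1 => l2.foldl (fun st w2 => pvStepA st (w1, w2)) st)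
      ((0 : Int), ([] : List (String × String × Int)))).2 = _
  rw [h]
  have : ((0 : Int), ([] : List (String × String × Int))) = (pvBest [], pvF []) := rfl
  rw [this, h2]
  simp

lemma pv_triples (ps : List (String × String)) (acc : List (String × String × Int)) :
    ps.foldl (fun acc p =>
        if PySem.Str.len p.1 = PySem.Str.len p.2 then acc ++ [pvTrip p] else acc) acc
      = acc ++ pvT ps := by
  rw [pvT, ← PySem.List.foldl_append_if pvLenEq pvTrip ps acc]
  apply PySem.List.foldl_congr_mem
  intro a x _
  by_cases hx : PySem.Str.len x.1 = PySem.Str.len x.2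
  · rw [if_pos hx, if_pos (by rw [pvLenEq, hx]; exact beq_self_eq_true _)]
  · rw [if_neg hx, if_neg (by rw [pvLenEq, beq_eq_false_iff_ne.mpr hx]; exact Bool.false_ne_true)]

lemma pv_B_eq (l1 l2 : List String) :
    closest_matching_alt l1 l2 = pvF (pvT (pvPairs l1 l2)) := by
  have h := pv_foldl_pairs
    (fun acc p => if PySem.Str.len p.1 = PySem.Str.len p.2 then acc ++ [pvTrip p] else acc)
    l1 l2 ([] : List (String × String × Int))
  have hT : (l1.foldl (fun acc w1 => l2.foldl (fun acc w2 =>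
      if PySem.Str.len w1 = PySem.Str.len w2 then acc ++ [(w1, w2, pvZipSame w1 w2)] else acc)
      acc) ([] : List (String × String × Int))) = pvT (pvPairs l1 l2) := by
    rw [show (l1.foldl (fun acc w1 => l2.foldl (fun acc w2 =>
        if PySem.Str.len w1 = PySem.Str.len w2 then acc ++ [(w1, w2, pvZipSame w1 w2)] else acc)
        acc) ([] : List (String × String × Int)))
      = (pvPairs l1 l2).foldl
        (fun acc p => if PySem.Str.len p.1 = PySem.Str.len p.2 then acc ++ [pvTrip p] else acc)
        [] from h]
    rw [pv_triples]
    rfl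
  show ((l1.foldl (fun acc w1 => l2.foldl (fun acc w2 =>
      if PySem.Str.len w1 = PySem.Str.len w2 then acc ++ [(w1, w2, pvZipSame w1 w2)] else acc)
      acc) ([] : List (String × String × Int))).filter
      (fun t => t.2.2 == PySem.List.maxD ((l1.foldl (fun acc w1 => l2.foldl (fun acc w2 =>
        if PySem.Str.len w1 = PySem.Str.len w2 then acc ++ [(w1, w2, pvZipSame w1 w2)] else acc)
        acc) ([] : List (String × String × Int))).map (fun t => t.2.2)) (fun x => x) 0)) = _
  rw [hT]
  have hnn : ∀ x ∈ (pvT (pvPairs l1 l2)).map (fun t => t.2.2), 0 ≤ x := by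
    intro x hx
    simp only [pvT, List.map_map, List.mem_map] at hx
    obtain ⟨p, -, rfl⟩ := hx
    exact pv_zip_nonneg p
  rw [pv_maxD_eq _ hnn]
  rfl

-- ===== VERDICT (by name: the statement is the Claim_ definition above) =====
theorem closest_matching_spec : Claim_equal_closest_matching := by
  intro l1 l2 _
  unfold Spec_closest_matching
  rw [pv_A_eq, pv_B_eq]
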